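-- pv_equiv track=rewrite | github.com/Sunandadadi/game-development | lap.py | check_totals
-- ===== SOURCE A (Python) =====
-- def check_totals(board, max):
--     possible_vals = set()
--     for row in board:
--         vals = set(row)
--         possible_vals.update(vals)
--     if " " in possible_vals:
--         possible_vals.remove(" ")
--
--     totals_okay = True
--     for v in possible_vals:
--         if sum(row.count(v) for row in board) > max:
--             totals_okay = False
--
--     return totals_okay
-- ===== SOURCE B (Python) =====
-- def check_totals(board, max):
--     counts = {}
--     for row in board:
--         for cell in row:
--             if cell != " ":
--                 counts[cell] = counts.get(cell, 0) + 1
--     for c in counts.values():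
--         if c > max:
--             return False
--     return True
-- ===== Notes on version B (the rewrite author's own statement) =====
-- stated objective: faster
-- what changed: B builds a count dictionary in one pass over the cells and checks its values once, instead of A's collecting the distinct values into a set and re-scanning every row with row.count for each distinct value.
import Mathlib
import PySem

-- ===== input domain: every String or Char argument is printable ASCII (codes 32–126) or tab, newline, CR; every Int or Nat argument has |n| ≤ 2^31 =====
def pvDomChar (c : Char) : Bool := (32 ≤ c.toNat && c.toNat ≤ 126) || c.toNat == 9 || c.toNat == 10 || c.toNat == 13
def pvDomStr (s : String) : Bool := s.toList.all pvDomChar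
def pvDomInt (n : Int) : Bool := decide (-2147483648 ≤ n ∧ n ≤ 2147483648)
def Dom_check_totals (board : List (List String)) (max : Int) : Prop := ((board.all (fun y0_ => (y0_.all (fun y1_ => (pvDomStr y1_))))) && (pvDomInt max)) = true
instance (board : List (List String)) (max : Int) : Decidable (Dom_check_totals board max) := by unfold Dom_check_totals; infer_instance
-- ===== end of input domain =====

-- B replaces A's set-then-rescan counting (row.count per distinct value) by a single
-- counting-dict pass over the cells; objective: faster (one pass instead of k rescans).

-- ===== PORT A =====
def check_totals (board : List (List String)) (max : Int) : Bool :=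
  -- possible_vals = set(); for row in board: possible_vals.update(set(row))
  let pv : PySem.Set String :=
    board.foldl (fun s row => PySem.Set.update s (PySem.Set.ofList row)) PySem.Set.empty
  -- if " " in possible_vals: possible_vals.remove(" ")  (the guard makes KeyError impossible,
  -- so remove-of-a-present-element is Set.discard)
  let pv : PySem.Set String :=
    if PySem.Set.contains pv " " then PySem.Set.discard pv " " else pv
  -- totals_okay loop
  pv.foldl (fun okay v =>
    if (board.map (fun row => (row.count v : Int))).sum > max then false else okay) true

-- ===== PORT B =====
def check_totals_alt (board : List (List String)) (max : Int) : Bool :=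
  let counts : PySem.Dict String Int :=
    board.foldl (fun d row =>
      row.foldl (fun d cell =>
        if cell ≠ " " then d.insert cell (d.getD cell 0 + 1) else d) d) PySem.Dict.empty
  -- for c in counts.values(): if c > max: return False;  return True
  counts.values.all (fun c => !(decide (c > max)))

-- ===== PRECONDITION & SPEC =====
def Spec_check_totals (board : List (List String)) (max : Int) (out : Bool) : Prop := out = check_totals_alt board max
instance (board : List (List String)) (max : Int) (out : Bool) : Decidable (Spec_check_totals board max out) := by unfold Spec_check_totals; infer_instance

-- ===== CLAIM (what is proved, stated in full; the proofs are below) =====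
def Claim_equal_check_totals : Prop := ∀ (board : List (List String)) (max : Int), Dom_check_totals board max → Spec_check_totals board max (check_totals board max)

-- ===== LEMMAS AND PROOFS =====

-- membership in A's accumulated set of values
theorem mem_pv_foldl (board : List (List String)) (s : PySem.Set String) (v : String) :
    v ∈ board.foldl (fun s row => PySem.Set.update s (PySem.Set.ofList row)) s ↔
      v ∈ s ∨ v ∈ board.flatten := by
  induction board generalizing s with
  | nil => simp
  | cons r rs ih =>
    simp [List.foldl_cons, ih, PySem.Set.mem_update, PySem.Set.mem_ofList, or_assoc]

-- A's accumulation loop yields `all` of the negated condition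
theorem foldl_okay (l : List String) (p : String → Prop) [DecidablePred p] (b : Bool) :
    l.foldl (fun okay v => if p v then false else okay) b = (b && l.all (fun v => !(decide (p v)))) := by
  induction l generalizing b with
  | nil => simp
  | cons x xs ih =>
    rw [List.foldl_cons, ih]
    by_cases h : p x <;> simp [h]

-- the per-row sums in A add up to the count over the flattened board
theorem sum_counts (board : List (List String)) (v : String) :
    (board.map (fun row => (row.count v : Int))).sum = (board.flatten.count v : Int) := by
  induction board with
  | nil => simp
  | cons r rs ih => simp [ih, List.count_append]

-- B's inner if-guarded loop is the loop over the filtered list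
theorem foldl_if_filter (l : List String) (d : PySem.Dict String Int) :
    l.foldl (fun d cell => if cell ≠ " " then d.insert cell (d.getD cell 0 + 1) else d) d =
      (l.filter (fun c => c ≠ " ")).foldl (fun d cell => d.insert cell (d.getD cell 0 + 1)) d := by
  induction l generalizing d with
  | nil => rfl
  | cons x xs ih =>
    rw [List.foldl_cons, List.filter_cons]
    by_cases h : x = " "
    · rw [if_neg (by simp [h]), if_neg (by simp [h])]
      exact ih d
    · rw [if_pos h, if_pos (by simp [h]), List.foldl_cons]
      exact ih _

theorem check_totals_spec : Claim_equal_check_totals := by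
  intro board max _
  unfold Spec_check_totals check_totals check_totals_alt
  rw [Bool.eq_iff_iff]
  have hBside :
      (board.foldl (fun d row =>
        row.foldl (fun d cell => if cell ≠ " " then d.insert cell (d.getD cell 0 + 1) else d) d)
        PySem.Dict.empty) =
      PySem.Dict.counter (board.flatten.filter (fun c => c ≠ " ")) := by
    rw [← List.foldl_flatten, foldl_if_filter,
        PySem.Dict.foldl_insert_getD_add_one_eq_counter]
  rw [hBside, foldl_okay]
  have hvals :
      (PySem.Dict.counter (List.filter (fun c => decide (c ≠ " ")) board.flatten)).values =
        (PySem.Dict.counter (List.filter (fun c => decide (c ≠ " ")) board.flatten)).keys.map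
          (fun k => (PySem.Dict.counter (List.filter (fun c => decide (c ≠ " ")) board.flatten)).getD k 0) :=
    PySem.Dict.values_eq_map_keys _ (PySem.Dict.nodup_keys_counter _) 0
  set pv := board.foldl (fun s row => PySem.Set.update s (PySem.Set.ofList row)) PySem.Set.empty
    with hpv
  have hpvmem : ∀ v : String, v ∈ pv ↔ v ∈ board.flatten := by
    intro v
    rw [hpv, mem_pv_foldl]
    simp [PySem.Set.empty]
  have hmem : ∀ v : String,
      (v ∈ (if PySem.Set.contains pv " " = true then PySem.Set.discard pv " " else pv)) ↔
        (v ∈ board.flatten ∧ v ≠ " ") := by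
    intro v
    by_cases hsp : PySem.Set.contains pv " " = true
    · rw [if_pos hsp, PySem.Set.mem_discard, hpvmem]
    · rw [if_neg hsp, hpvmem]
      constructor
      · intro h
        refine ⟨h, ?_⟩
        intro he; subst he
        exact hsp (by rw [PySem.Set.contains_iff]; exact (hpvmem " ").mpr h)
      · exact fun h => h.1
  have hcnt : ∀ v : String, v ≠ " " →
      List.count v (List.filter (fun c => decide (c ≠ " ")) board.flatten) =
        List.count v board.flatten := by
    intro v hv
    exact List.count_filter (by simp [hv])
  simp only [List.all_eq_true, List.all_map, Function.comp, PySem.Dict.getD_counter,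
    PySem.Dict.keys_counter, Bool.not_eq_eq_eq_not, Bool.not_true, decide_eq_false_iff_not,
    not_lt, PySem.Set.mem_ofList, List.mem_filter, decide_eq_true_eq, sum_counts, hmem,
    hvals, Bool.true_and]
  constructor
  · intro hA v hv
    rw [hcnt v hv.2]
    exact hA v hv
  · intro hB v hv
    have := hB v hv
    rwa [hcnt v hv.2] at this
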